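-- pv_equiv track=rewrite | github.com/danee593/WebScraperImovirtual | inmovirtual_scraper.py | extract_primary_info
-- ===== SOURCE A (Python) =====
-- def extract_primary_info(required_keys: list, dictionary_to_verify: dict) -> dict:
--     primary_data = {}
--     if all([key in dictionary_to_verify for key in required_keys]):
--         for key in required_keys:
--             primary_data[key] = dictionary_to_verify[key]
--         return primary_data
--     else:
--         return None
-- ===== SOURCE B (Python) =====
-- def extract_primary_info(required_keys: list, dictionary_to_verify: dict) -> dict:
--     try:
--         return {key: dictionary_to_verify[key] for key in required_keys}
--     except KeyError:
--         return None
-- ===== Notes on version B (the rewrite author's own statement) =====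
-- stated objective: idiomatic
-- what changed: EAFP instead of LBYL: one dict comprehension inside try/except KeyError replaces the all([...])-validation pass plus a separate copy loop, so a single pass with no materialised boolean list or flag.
import Mathlib
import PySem

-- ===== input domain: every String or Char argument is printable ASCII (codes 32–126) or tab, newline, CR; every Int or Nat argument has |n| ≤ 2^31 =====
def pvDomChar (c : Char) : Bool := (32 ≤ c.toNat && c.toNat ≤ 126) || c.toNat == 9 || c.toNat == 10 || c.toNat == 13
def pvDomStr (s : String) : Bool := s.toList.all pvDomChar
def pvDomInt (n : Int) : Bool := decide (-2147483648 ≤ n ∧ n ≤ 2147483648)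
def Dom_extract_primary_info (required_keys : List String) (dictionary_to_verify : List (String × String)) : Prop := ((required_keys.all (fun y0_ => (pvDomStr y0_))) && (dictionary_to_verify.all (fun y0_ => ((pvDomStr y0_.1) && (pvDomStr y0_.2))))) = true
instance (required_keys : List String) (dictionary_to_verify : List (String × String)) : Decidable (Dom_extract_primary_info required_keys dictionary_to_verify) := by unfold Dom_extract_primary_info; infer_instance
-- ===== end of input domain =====

-- B replaces A's validate-then-copy (all() pass, then a copy loop) by a single EAFP pass that
-- builds the dict and aborts with None on the first missing key (idiomatic rewrite, same cost).

-- ===== PORT A =====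
-- A: check all keys present, then copy them one by one into a fresh dict; else None.
def extract_primary_info (required_keys : List String) (dictionary_to_verify : List (String × String)) : Option (List (String × String)) :=
  let dv := PySem.Dict.mk dictionary_to_verify
  let primary_data : PySem.Dict String String := PySem.Dict.empty
  if required_keys.all (fun key => dv.contains key) then
    some ((required_keys.foldl (fun pd key => pd.insert key (dv.getD key "")) primary_data).items)
  else
    none

-- ===== PORT B =====
-- B: one pass building the dict, returning none at the first missing key (the KeyError of the
-- comprehension caught by the except).
def extract_primary_info_altGo (dv : PySem.Dict String String) : List String → PySem.Dict String String → Option (PySem.Dict String String)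
  | [], acc => some acc
  | key :: ks, acc =>
    match dv.get? key with
    | none => none
    | some v => extract_primary_info_altGo dv ks (acc.insert key v)

def extract_primary_info_alt (required_keys : List String) (dictionary_to_verify : List (String × String)) : Option (List (String × String)) :=
  (extract_primary_info_altGo (PySem.Dict.mk dictionary_to_verify) required_keys PySem.Dict.empty).map (·.items)

-- ===== PRECONDITION & SPEC =====
def Spec_extract_primary_info (required_keys : List String) (dictionary_to_verify : List (String × String)) (out : Option (List (String × String))) : Prop := out = extract_primary_info_alt required_keys dictionary_to_verify
instance (required_keys : List String) (dictionary_to_verify : List (String × String)) (out : Option (List (String × String))) : Decidable (Spec_extract_primary_info required_keys dictionary_to_verify out) := by unfold Spec_extract_primary_info; infer_instance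

-- ===== CLAIM (what is proved, stated in full; the proofs are below) =====
def Claim_equal_extract_primary_info : Prop := ∀ (required_keys : List String) (dictionary_to_verify : List (String × String)), Dom_extract_primary_info required_keys dictionary_to_verify → Spec_extract_primary_info required_keys dictionary_to_verify (extract_primary_info required_keys dictionary_to_verify)

-- ===== LEMMAS AND PROOFS =====
theorem altGo_char (dv : PySem.Dict String String) (rk : List String) (acc : PySem.Dict String String) :
    extract_primary_info_altGo dv rk acc =
      if rk.all (fun key => dv.contains key) then
        some (rk.foldl (fun pd key => pd.insert key (dv.getD key "")) acc)
      else none := by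
  induction rk generalizing acc with
  | nil => simp [extract_primary_info_altGo]
  | cons k ks ih =>
    cases h : dv.get? k with
    | none =>
      have hc : dv.contains k = false := by
        rw [PySem.Dict.contains_eq_isSome_get?, h]; rfl
      simp [extract_primary_info_altGo, h, hc]
    | some v =>
      have hc : dv.contains k = true := by
        rw [PySem.Dict.contains_eq_isSome_get?, h]; rfl
      have hg : dv.getD k "" = v := PySem.Dict.getD_of_get?_eq_some dv "" h
      simp [extract_primary_info_altGo, h, ih, hc, hg]

-- ===== VERDICT (by name: the statement is the Claim_ definition above) =====
theorem extract_primary_info_spec : Claim_equal_extract_primary_info := by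
  intro rk d _
  unfold Spec_extract_primary_info extract_primary_info extract_primary_info_alt
  rw [altGo_char]
  split <;> simp_all
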